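-- pv_equiv track=rewrite | github.com/Koivunlehti/Python-kurssi-MOOC-2024 | osa_6/osio_1/tehtava_6.py | laske_arvosanat
-- ===== SOURCE A (Python) =====
-- def laske_tehtava_pisteet(tehtava_maara: int, max_tehtavamaara: int) -> int:
--     # Tehtyjen tehtävien muunto pisteiksi
--     prosentit = tehtava_maara * 100 // max_tehtavamaara
--     pisteet = 10
--     if prosentit == 100:
--         return 10
--     else:
--         for i in range(100,0,-10):
--             if prosentit < i:
--                 pisteet -= 1
--     return pisteet
--
-- def laske_arvosanat(kokeet: dict, tehtavamaarat: dict, max_tehtavamaara: int = 40) -> dict: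
--     # Luodaan arvosanat suorituksista ja palautetaan niistä sanakirja
--     arvosanat = {}
--     for id, tulokset in kokeet.items():
--         arvosana = 0
--         koepisteet = 0
--         for pisteet in tulokset:
--             koepisteet += int(pisteet)
--         tehtava_pisteet = laske_tehtava_pisteet(tehtavamaarat[id], max_tehtavamaara)
--         pisteet = koepisteet + tehtava_pisteet
--         if pisteet <= 14:
--             arvosana = 0
--         elif pisteet >= 15 and pisteet <= 17:
--             arvosana = 1
--         elif pisteet >= 18 and pisteet <= 20:
--             arvosana = 2
--         elif pisteet >= 21 and pisteet <= 23:
--             arvosana = 3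
--         elif pisteet >= 24 and pisteet <= 27:
--             arvosana = 4
--         elif pisteet >= 28 and pisteet <= 30:
--             arvosana = 5
--         arvosanat[id] = arvosana
--     return arvosanat
-- ===== SOURCE B (Python) =====
-- def laske_arvosanat(kokeet: dict, tehtavamaarat: dict, max_tehtavamaara: int = 40) -> dict:
--     # Closed-form task-point conversion and an arithmetic grade table instead of decrement loops
--     arvosanat = {}
--     for id, tulokset in kokeet.items():
--         prosentit = tehtavamaarat[id] * 100 // max_tehtavamaara
--         pisteet = sum(int(p) for p in tulokset) + max(0, min(prosentit // 10, 10))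
--         arvosanat[id] = 0 if pisteet > 30 else (pisteet >= 15) + (pisteet >= 18) + (pisteet >= 21) + (pisteet >= 24) + (pisteet >= 28)
--     return arvosanat
-- ===== Notes on version B (the rewrite author's own statement) =====
-- stated objective: simpler
-- what changed: The helper's ten-step threshold-decrement loop (plus its ==100 special case) is replaced by the closed form max(0, min(prosentit // 10, 10)) inlined into the main loop, and the six-branch if-elif grade cascade is replaced by a sum of five comparison indicators.
import Mathlib
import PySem

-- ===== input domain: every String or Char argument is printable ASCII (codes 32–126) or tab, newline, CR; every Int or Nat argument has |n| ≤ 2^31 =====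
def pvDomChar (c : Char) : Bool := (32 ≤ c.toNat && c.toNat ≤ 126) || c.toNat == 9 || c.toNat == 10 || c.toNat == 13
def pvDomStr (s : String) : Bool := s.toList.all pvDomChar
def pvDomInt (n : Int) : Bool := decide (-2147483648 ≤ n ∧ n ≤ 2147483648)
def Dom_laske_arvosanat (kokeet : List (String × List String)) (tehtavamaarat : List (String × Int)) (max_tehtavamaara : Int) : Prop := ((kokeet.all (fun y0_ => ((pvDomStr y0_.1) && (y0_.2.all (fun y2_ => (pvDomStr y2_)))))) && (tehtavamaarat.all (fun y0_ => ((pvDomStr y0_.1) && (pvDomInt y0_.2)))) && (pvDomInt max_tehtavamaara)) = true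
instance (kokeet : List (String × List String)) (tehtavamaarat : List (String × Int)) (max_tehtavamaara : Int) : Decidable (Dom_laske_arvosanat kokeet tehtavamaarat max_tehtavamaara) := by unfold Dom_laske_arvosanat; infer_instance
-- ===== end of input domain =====

-- B replaces A's helper's threshold-decrement loop by a closed clamp formula and A's grade
-- cascade by a sum of comparison indicators (objective: simpler); return values proved equal on Pre_.

-- ===== PORT A =====
def laske_tehtava_pisteet (tehtava_maara : Int) (max_tehtavamaara : Int) : Int :=
  let prosentit := PySem.Int.floordiv (tehtava_maara * 100) max_tehtavamaara
  if prosentit == 100 then 10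
  else (PySem.List.pyRange 100 0 (-10)).foldl
        (fun pisteet i => if prosentit < i then pisteet - 1 else pisteet) 10

def laske_arvosanat (kokeet : List (String × List String)) (tehtavamaarat : List (String × Int)) (max_tehtavamaara : Int) : List (String × Int) :=
  let td := PySem.Dict.ofList tehtavamaarat
  ((PySem.Dict.ofList kokeet).items.foldl (fun (arvosanat : PySem.Dict String Int) p =>
      let koepisteet := p.2.foldl (fun acc s => acc + (PySem.Int.ofStr? s).getD 0) 0
      let tehtava_pisteet := laske_tehtava_pisteet (td.getD p.1 0) max_tehtavamaara
      let pisteet := koepisteet + tehtava_pisteet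
      let arvosana : Int :=
        if pisteet ≤ 14 then 0
        else if 15 ≤ pisteet ∧ pisteet ≤ 17 then 1
        else if 18 ≤ pisteet ∧ pisteet ≤ 20 then 2
        else if 21 ≤ pisteet ∧ pisteet ≤ 23 then 3
        else if 24 ≤ pisteet ∧ pisteet ≤ 27 then 4
        else if 28 ≤ pisteet ∧ pisteet ≤ 30 then 5
        else 0
      arvosanat.insert p.1 arvosana) PySem.Dict.empty).items

-- ===== PORT B =====
def laske_arvosanat_alt (kokeet : List (String × List String)) (tehtavamaarat : List (String × Int)) (max_tehtavamaara : Int) : List (String × Int) :=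
  let td := PySem.Dict.ofList tehtavamaarat
  ((PySem.Dict.ofList kokeet).items.foldl (fun (arvosanat : PySem.Dict String Int) p =>
      let prosentit := PySem.Int.floordiv (td.getD p.1 0 * 100) max_tehtavamaara
      let pisteet := (p.2.map (fun s => (PySem.Int.ofStr? s).getD 0)).sum
                       + max 0 (min (PySem.Int.floordiv prosentit 10) 10)
      let arvosana : Int :=
        if 30 < pisteet then 0
        else (if 15 ≤ pisteet then 1 else 0) + (if 18 ≤ pisteet then 1 else 0)
             + (if 21 ≤ pisteet then 1 else 0) + (if 24 ≤ pisteet then 1 else 0)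
             + (if 28 ≤ pisteet then 1 else 0)
      arvosanat.insert p.1 arvosana) PySem.Dict.empty).items

-- ===== PRECONDITION & SPEC =====
-- Pre_ excludes exactly the inputs where Python A raises: an exam entry with max_tehtavamaara = 0
-- (ZeroDivisionError), an exam id missing from tehtavamaarat (KeyError), or a result string int()
-- cannot parse (ValueError); with no exam entries A returns {} and nothing is excluded.
def Pre_laske_arvosanat (kokeet : List (String × List String)) (tehtavamaarat : List (String × Int)) (max_tehtavamaara : Int) : Prop :=
  ∀ p ∈ (PySem.Dict.ofList kokeet).items,
    max_tehtavamaara ≠ 0 ∧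
    ((PySem.Dict.ofList tehtavamaarat).get? p.1).isSome ∧
    ∀ s ∈ p.2, (PySem.Int.ofStr? s).isSome
instance (kokeet : List (String × List String)) (tehtavamaarat : List (String × Int)) (max_tehtavamaara : Int) : Decidable (Pre_laske_arvosanat kokeet tehtavamaarat max_tehtavamaara) := by unfold Pre_laske_arvosanat; infer_instance

def pvWitness_laske_arvosanat : (List (String × List String)) × (List (String × Int)) × Int :=
  ([("a", ["5", "7"])], [("a", 20)], 40)

def Spec_laske_arvosanat (kokeet : List (String × List String)) (tehtavamaarat : List (String × Int)) (max_tehtavamaara : Int) (out : List (String × Int)) : Prop := out = laske_arvosanat_alt kokeet tehtavamaarat max_tehtavamaara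
instance (kokeet : List (String × List String)) (tehtavamaarat : List (String × Int)) (max_tehtavamaara : Int) (out : List (String × Int)) : Decidable (Spec_laske_arvosanat kokeet tehtavamaarat max_tehtavamaara out) := by unfold Spec_laske_arvosanat; infer_instance

-- ===== CLAIM (what is proved, stated in full; the proofs are below) =====
def Claim_equal_laske_arvosanat : Prop := ∀ (kokeet : List (String × List String)) (tehtavamaarat : List (String × Int)) (max_tehtavamaara : Int), Dom_laske_arvosanat kokeet tehtavamaarat max_tehtavamaara → Pre_laske_arvosanat kokeet tehtavamaarat max_tehtavamaara → Spec_laske_arvosanat kokeet tehtavamaarat max_tehtavamaara (laske_arvosanat kokeet tehtavamaarat max_tehtavamaara)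

-- ===== LEMMAS AND PROOFS =====

-- A's decrement loop, written as "initial value minus the number of failed thresholds"
lemma fold_count (pro : Int) (l : List Int) (a : Int) :
    l.foldl (fun p i => if pro < i then p - 1 else p) a
      = a - (l.countP (fun i => pro < i) : Int) := by
  induction l generalizing a with
  | nil => simp
  | cons x xs ih =>
    simp only [List.foldl_cons, List.countP_cons, ih, decide_eq_true_eq]
    split_ifs <;> push_cast <;> omega

-- A's threshold-decrement loop (with the ==100 shortcut) equals B's clamp closed form
lemma helper_closed (pro : Int) :
    (if pro == 100 then (10:Int)
     else (PySem.List.pyRange 100 0 (-10)).foldl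
            (fun pisteet i => if pro < i then pisteet - 1 else pisteet) 10)
    = max 0 (min (PySem.Int.floordiv pro 10) 10) := by
  have hr : PySem.List.pyRange 100 0 (-10) = [100, 90, 80, 70, 60, 50, 40, 30, 20, 10] := by decide
  rw [hr, PySem.Int.floordiv_eq_ediv_of_pos (by norm_num : (0:Int) < 10), fold_count]
  simp only [List.countP_cons, List.countP_nil, decide_eq_true_eq, beq_iff_eq]
  by_cases h100 : pro = 100
  · subst h100; norm_num
  · rw [if_neg h100]
    by_cases h0 : pro < 10
    · simp only [show pro < 10 from by omega, show pro < 20 from by omega, show pro < 30 from by omega, show pro < 40 from by omega, show pro < 50 from by omega, show pro < 60 from by omega, show pro < 70 from by omega, show pro < 80 from by omega, show pro < 90 from by omega, show pro < 100 from by omega, if_true, if_false]; push_cast; omega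
    by_cases h1 : pro < 20
    · simp only [show ¬ pro < 10 from by omega, show pro < 20 from by omega, show pro < 30 from by omega, show pro < 40 from by omega, show pro < 50 from by omega, show pro < 60 from by omega, show pro < 70 from by omega, show pro < 80 from by omega, show pro < 90 from by omega, show pro < 100 from by omega, if_true, if_false]; push_cast; omega
    by_cases h2 : pro < 30
    · simp only [show ¬ pro < 10 from by omega, show ¬ pro < 20 from by omega, show pro < 30 from by omega, show pro < 40 from by omega, show pro < 50 from by omega, show pro < 60 from by omega, show pro < 70 from by omega, show pro < 80 from by omega, show pro < 90 from by omega, show pro < 100 from by omega, if_true, if_false]; push_cast; omega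
    by_cases h3 : pro < 40
    · simp only [show ¬ pro < 10 from by omega, show ¬ pro < 20 from by omega, show ¬ pro < 30 from by omega, show pro < 40 from by omega, show pro < 50 from by omega, show pro < 60 from by omega, show pro < 70 from by omega, show pro < 80 from by omega, show pro < 90 from by omega, show pro < 100 from by omega, if_true, if_false]; push_cast; omega
    by_cases h4 : pro < 50
    · simp only [show ¬ pro < 10 from by omega, show ¬ pro < 20 from by omega, show ¬ pro < 30 from by omega, show ¬ pro < 40 from by omega, show pro < 50 from by omega, show pro < 60 from by omega, show pro < 70 from by omega, show pro < 80 from by omega, show pro < 90 from by omega, show pro < 100 from by omega, if_true, if_false]; push_cast; omega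
    by_cases h5 : pro < 60
    · simp only [show ¬ pro < 10 from by omega, show ¬ pro < 20 from by omega, show ¬ pro < 30 from by omega, show ¬ pro < 40 from by omega, show ¬ pro < 50 from by omega, show pro < 60 from by omega, show pro < 70 from by omega, show pro < 80 from by omega, show pro < 90 from by omega, show pro < 100 from by omega, if_true, if_false]; push_cast; omega
    by_cases h6 : pro < 70
    · simp only [show ¬ pro < 10 from by omega, show ¬ pro < 20 from by omega, show ¬ pro < 30 from by omega, show ¬ pro < 40 from by omega, show ¬ pro < 50 from by omega, show ¬ pro < 60 from by omega, show pro < 70 from by omega, show pro < 80 from by omega, show pro < 90 from by omega, show pro < 100 from by omega, if_true, if_false]; push_cast; omega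
    by_cases h7 : pro < 80
    · simp only [show ¬ pro < 10 from by omega, show ¬ pro < 20 from by omega, show ¬ pro < 30 from by omega, show ¬ pro < 40 from by omega, show ¬ pro < 50 from by omega, show ¬ pro < 60 from by omega, show ¬ pro < 70 from by omega, show pro < 80 from by omega, show pro < 90 from by omega, show pro < 100 from by omega, if_true, if_false]; push_cast; omega
    by_cases h8 : pro < 90
    · simp only [show ¬ pro < 10 from by omega, show ¬ pro < 20 from by omega, show ¬ pro < 30 from by omega, show ¬ pro < 40 from by omega, show ¬ pro < 50 from by omega, show ¬ pro < 60 from by omega, show ¬ pro < 70 from by omega, show ¬ pro < 80 from by omega, show pro < 90 from by omega, show pro < 100 from by omega, if_true, if_false]; push_cast; omega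
    by_cases h9 : pro < 100
    · simp only [show ¬ pro < 10 from by omega, show ¬ pro < 20 from by omega, show ¬ pro < 30 from by omega, show ¬ pro < 40 from by omega, show ¬ pro < 50 from by omega, show ¬ pro < 60 from by omega, show ¬ pro < 70 from by omega, show ¬ pro < 80 from by omega, show ¬ pro < 90 from by omega, show pro < 100 from by omega, if_true, if_false]; push_cast; omega
    simp only [show ¬ pro < 10 from by omega, show ¬ pro < 20 from by omega, show ¬ pro < 30 from by omega, show ¬ pro < 40 from by omega, show ¬ pro < 50 from by omega, show ¬ pro < 60 from by omega, show ¬ pro < 70 from by omega, show ¬ pro < 80 from by omega, show ¬ pro < 90 from by omega, show ¬ pro < 100 from by omega, if_true, if_false]; push_cast; omega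

lemma helper_eq (t m : Int) :
    laske_tehtava_pisteet t m
      = max 0 (min (PySem.Int.floordiv (PySem.Int.floordiv (t * 100) m) 10) 10) := by
  unfold laske_tehtava_pisteet
  exact helper_closed _

-- A's running sum of parsed strings equals B's map-then-sum
lemma sum_eq (l : List String) (a : Int) :
    l.foldl (fun acc s => acc + (PySem.Int.ofStr? s).getD 0) a
      = a + (l.map (fun s => (PySem.Int.ofStr? s).getD 0)).sum := by
  induction l generalizing a with
  | nil => simp
  | cons x xs ih => simp [ih]; ring

-- A's if-elif grade cascade equals B's sum of comparison indicators
lemma grade_eq (x : Int) :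
    (if x ≤ 14 then (0:Int)
     else if 15 ≤ x ∧ x ≤ 17 then 1
     else if 18 ≤ x ∧ x ≤ 20 then 2
     else if 21 ≤ x ∧ x ≤ 23 then 3
     else if 24 ≤ x ∧ x ≤ 27 then 4
     else if 28 ≤ x ∧ x ≤ 30 then 5
     else 0)
    = (if 30 < x then 0
       else (if 15 ≤ x then (1:Int) else 0) + (if 18 ≤ x then 1 else 0)
            + (if 21 ≤ x then 1 else 0) + (if 24 ≤ x then 1 else 0)
            + (if 28 ≤ x then 1 else 0)) := by
  by_cases h0 : x ≤ 14
  · simp only [show x ≤ 14 from by omega, show x ≤ 17 from by omega, show x ≤ 20 from by omega, show x ≤ 23 from by omega, show x ≤ 27 from by omega, show x ≤ 30 from by omega, show ¬ (15 ≤ x) from by omega, show ¬ (18 ≤ x) from by omega, show ¬ (21 ≤ x) from by omega, show ¬ (24 ≤ x) from by omega, show ¬ (28 ≤ x) from by omega, show ¬ (30 < x) from by omega, true_and, and_true, false_and, and_false, if_true, if_false]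
    all_goals rfl
  by_cases h1 : x ≤ 17
  · simp only [show ¬ (x ≤ 14) from by omega, show x ≤ 17 from by omega, show x ≤ 20 from by omega, show x ≤ 23 from by omega, show x ≤ 27 from by omega, show x ≤ 30 from by omega, show 15 ≤ x from by omega, show ¬ (18 ≤ x) from by omega, show ¬ (21 ≤ x) from by omega, show ¬ (24 ≤ x) from by omega, show ¬ (28 ≤ x) from by omega, show ¬ (30 < x) from by omega, true_and, and_true, false_and, and_false, if_true, if_false]
    all_goals rfl
  by_cases h2 : x ≤ 20
  · simp only [show ¬ (x ≤ 14) from by omega, show ¬ (x ≤ 17) from by omega, show x ≤ 20 from by omega, show x ≤ 23 from by omega, show x ≤ 27 from by omega, show x ≤ 30 from by omega, show 15 ≤ x from by omega, show 18 ≤ x from by omega, show ¬ (21 ≤ x) from by omega, show ¬ (24 ≤ x) from by omega, show ¬ (28 ≤ x) from by omega, show ¬ (30 < x) from by omega, true_and, and_true, false_and, and_false, if_true, if_false]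
    all_goals rfl
  by_cases h3 : x ≤ 23
  · simp only [show ¬ (x ≤ 14) from by omega, show ¬ (x ≤ 17) from by omega, show ¬ (x ≤ 20) from by omega, show x ≤ 23 from by omega, show x ≤ 27 from by omega, show x ≤ 30 from by omega, show 15 ≤ x from by omega, show 18 ≤ x from by omega, show 21 ≤ x from by omega, show ¬ (24 ≤ x) from by omega, show ¬ (28 ≤ x) from by omega, show ¬ (30 < x) from by omega, true_and, and_true, false_and, and_false, if_true, if_false]
    all_goals rfl
  by_cases h4 : x ≤ 27
  · simp only [show ¬ (x ≤ 14) from by omega, show ¬ (x ≤ 17) from by omega, show ¬ (x ≤ 20) from by omega, show ¬ (x ≤ 23) from by omega, show x ≤ 27 from by omega, show x ≤ 30 from by omega, show 15 ≤ x from by omega, show 18 ≤ x from by omega, show 21 ≤ x from by omega, show 24 ≤ x from by omega, show ¬ (28 ≤ x) from by omega, show ¬ (30 < x) from by omega, true_and, and_true, false_and, and_false, if_true, if_false]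
    all_goals rfl
  by_cases h5 : x ≤ 30
  · simp only [show ¬ (x ≤ 14) from by omega, show ¬ (x ≤ 17) from by omega, show ¬ (x ≤ 20) from by omega, show ¬ (x ≤ 23) from by omega, show ¬ (x ≤ 27) from by omega, show x ≤ 30 from by omega, show 15 ≤ x from by omega, show 18 ≤ x from by omega, show 21 ≤ x from by omega, show 24 ≤ x from by omega, show 28 ≤ x from by omega, show ¬ (30 < x) from by omega, true_and, and_true, false_and, and_false, if_true, if_false]
    all_goals rfl
  simp only [show ¬ (x ≤ 14) from by omega, show ¬ (x ≤ 17) from by omega, show ¬ (x ≤ 20) from by omega, show ¬ (x ≤ 23) from by omega, show ¬ (x ≤ 27) from by omega, show ¬ (x ≤ 30) from by omega, show 15 ≤ x from by omega, show 18 ≤ x from by omega, show 21 ≤ x from by omega, show 24 ≤ x from by omega, show 28 ≤ x from by omega, show 30 < x from by omega, true_and, and_true, false_and, and_false, if_true, if_false]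
  all_goals rfl

-- the two fold bodies agree entry-by-entry
lemma step_eq (td : PySem.Dict String Int) (max_tehtavamaara : Int)
    (l : List (String × List String)) (d : PySem.Dict String Int) :
    l.foldl (fun (arvosanat : PySem.Dict String Int) p =>
      let koepisteet := p.2.foldl (fun acc s => acc + (PySem.Int.ofStr? s).getD 0) 0
      let tehtava_pisteet := laske_tehtava_pisteet (td.getD p.1 0) max_tehtavamaara
      let pisteet := koepisteet + tehtava_pisteet
      let arvosana : Int :=
        if pisteet ≤ 14 then 0
        else if 15 ≤ pisteet ∧ pisteet ≤ 17 then 1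
        else if 18 ≤ pisteet ∧ pisteet ≤ 20 then 2
        else if 21 ≤ pisteet ∧ pisteet ≤ 23 then 3
        else if 24 ≤ pisteet ∧ pisteet ≤ 27 then 4
        else if 28 ≤ pisteet ∧ pisteet ≤ 30 then 5
        else 0
      arvosanat.insert p.1 arvosana) d
    = l.foldl (fun (arvosanat : PySem.Dict String Int) p =>
      let prosentit := PySem.Int.floordiv (td.getD p.1 0 * 100) max_tehtavamaara
      let pisteet := (p.2.map (fun s => (PySem.Int.ofStr? s).getD 0)).sum
                       + max 0 (min (PySem.Int.floordiv prosentit 10) 10)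
      let arvosana : Int :=
        if 30 < pisteet then 0
        else (if 15 ≤ pisteet then 1 else 0) + (if 18 ≤ pisteet then 1 else 0)
             + (if 21 ≤ pisteet then 1 else 0) + (if 24 ≤ pisteet then 1 else 0)
             + (if 28 ≤ pisteet then 1 else 0)
      arvosanat.insert p.1 arvosana) d := by
  apply PySem.List.foldl_congr_mem
  intro arvosanat p _
  simp only []
  rw [sum_eq p.2 0, zero_add, helper_eq, grade_eq]

-- ===== VERDICT (by name: the statement is the Claim_ definition above) =====
theorem laske_arvosanat_spec : Claim_equal_laske_arvosanat := by
  intro kokeet tehtavamaarat max_tehtavamaara _ _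
  show laske_arvosanat kokeet tehtavamaarat max_tehtavamaara
      = laske_arvosanat_alt kokeet tehtavamaarat max_tehtavamaara
  exact congrArg PySem.Dict.items
    (step_eq (PySem.Dict.ofList tehtavamaarat) max_tehtavamaara
      (PySem.Dict.ofList kokeet).items PySem.Dict.empty)
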